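-- pv_equiv track=rewrite | github.com/Deepmind666/memory_cluster_algorithm | scripts/check_ci_output_isolation.py | validate_bundle_commands
-- ===== SOURCE A (Python) =====
-- from typing import Iterable, Sequence
--
-- _OUTPUT_FLAGS = {
--     "--output",
--     "--candidate-synthetic",
--     "--candidate-realistic",
--     "--candidate-stress",
--     "--ann-hybrid",
--     "--candidate-benchmark",
-- }
--
-- _FORBIDDEN_ROOT_JSON_PATHS = {
--     "outputs/candidate_filter_benchmark.json",
--     "outputs/candidate_profile_validation_synthetic_active.json",
--     "outputs/candidate_profile_validation_realistic.json",
--     "outputs/candidate_profile_validation_stress.json",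
--     "outputs/ann_hybrid_benchmark.json",
--     "outputs/stage2_guardrail.json",
-- }
--
-- def _extract_output_paths(commands: Sequence[Sequence[str]]) -> list[str]:
--     found: list[str] = []
--     for command in commands:
--         for idx, token in enumerate(command):
--             if token not in _OUTPUT_FLAGS:
--                 continue
--             next_idx = idx + 1
--             if next_idx >= len(command):
--                 continue
--             found.append(str(command[next_idx]).replace("\\", "/"))
--     return found
--
-- def validate_bundle_commands(commands: Sequence[Sequence[str]]) -> list[str]:
--     violations: list[str] = []
--     paths = _extract_output_paths(commands)
--     if not paths:
--         violations.append("bundle_commands:no_output_paths_found")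
--         return violations
--
--     for path in paths:
--         if path in _FORBIDDEN_ROOT_JSON_PATHS:
--             violations.append(f"bundle_commands:forbidden_root_json:{path}")
--         if path.startswith("outputs/") and path.endswith(".json") and not path.startswith("outputs/ci_outputs/"):
--             violations.append(f"bundle_commands:json_not_in_ci_outputs:{path}")
--     return violations
-- ===== SOURCE B (Python) =====
-- _OUTPUT_FLAGS = {
--     "--output",
--     "--candidate-synthetic",
--     "--candidate-realistic",
--     "--candidate-stress",
--     "--ann-hybrid",
--     "--candidate-benchmark",
-- }
--
-- _FORBIDDEN_ROOT_JSON_PATHS = {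
--     "outputs/candidate_filter_benchmark.json",
--     "outputs/candidate_profile_validation_synthetic_active.json",
--     "outputs/candidate_profile_validation_realistic.json",
--     "outputs/candidate_profile_validation_stress.json",
--     "outputs/ann_hybrid_benchmark.json",
--     "outputs/stage2_guardrail.json",
-- }
--
-- def validate_bundle_commands(commands):
--     violations = []
--     found_any = False
--     for command in commands:
--         for token, nxt in zip(command, command[1:]):
--             if token in _OUTPUT_FLAGS:
--                 found_any = True
--                 path = str(nxt).replace("\\", "/")
--                 if path in _FORBIDDEN_ROOT_JSON_PATHS:
--                     violations.append(f"bundle_commands:forbidden_root_json:{path}")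
--                 if path.startswith("outputs/") and path.endswith(".json") and not path.startswith("outputs/ci_outputs/"):
--                     violations.append(f"bundle_commands:json_not_in_ci_outputs:{path}")
--     if not found_any:
--         violations.append("bundle_commands:no_output_paths_found")
--     return violations
-- ===== Notes on version B (the rewrite author's own statement) =====
-- stated objective: simpler
-- what changed: Fuses A's two passes (extract all output paths into an intermediate list, then validate it) into a single scan over adjacent token pairs that checks each path inline, replacing the emptiness test on the intermediate list with a found_any boolean.
import Mathlib
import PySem

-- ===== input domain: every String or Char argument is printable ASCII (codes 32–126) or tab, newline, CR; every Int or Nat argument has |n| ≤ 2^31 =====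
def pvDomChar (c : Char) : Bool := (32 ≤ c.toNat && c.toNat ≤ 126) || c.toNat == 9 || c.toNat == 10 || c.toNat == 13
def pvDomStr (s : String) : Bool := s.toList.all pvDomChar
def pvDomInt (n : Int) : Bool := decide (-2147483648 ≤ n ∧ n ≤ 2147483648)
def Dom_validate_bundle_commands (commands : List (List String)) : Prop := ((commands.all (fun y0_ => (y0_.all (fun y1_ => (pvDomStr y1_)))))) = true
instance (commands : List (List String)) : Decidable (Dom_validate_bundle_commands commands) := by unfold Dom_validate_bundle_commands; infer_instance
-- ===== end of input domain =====

-- B fuses A's extract-then-validate two passes into one scan over adjacent token pairs,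
-- checking each output path inline and tracking emptiness with a boolean (objective: simpler, same cost).

-- ===== PORT A =====
def pvOutputFlags : List String :=
  ["--output", "--candidate-synthetic", "--candidate-realistic",
   "--candidate-stress", "--ann-hybrid", "--candidate-benchmark"]

def pvForbidden : List String :=
  ["outputs/candidate_filter_benchmark.json",
   "outputs/candidate_profile_validation_synthetic_active.json",
   "outputs/candidate_profile_validation_realistic.json",
   "outputs/candidate_profile_validation_stress.json",
   "outputs/ann_hybrid_benchmark.json",
   "outputs/stage2_guardrail.json"]

-- path.replace("\\", "/")
def pvNorm (s : String) : String := PySem.Str.replace s "\\" "/"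

-- inner loop of _extract_output_paths: for idx, token in enumerate(command)
def pvExtractLoop (command : List String) : List (Int × String) → List String → List String
  | [], found => found
  | (idx, token) :: rest, found =>
    if pvOutputFlags.contains token then
      if idx + 1 ≥ (command.length : Int) then pvExtractLoop command rest found
      else pvExtractLoop command rest
        (found ++ [pvNorm ((PySem.List.pyGet? command (idx + 1)).getD "")])
    else pvExtractLoop command rest found

-- outer loop of _extract_output_paths
def pvExtractAll : List (List String) → List String → List String
  | [], found => found
  | c :: cs, found => pvExtractAll cs (pvExtractLoop c (PySem.List.enumerate c) found)

-- path.startswith("outputs/") and path.endswith(".json") and not path.startswith("outputs/ci_outputs/")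
def pvJsonCond (path : String) : Bool :=
  PySem.Str.startswith path "outputs/" && PySem.Str.endswith path ".json" &&
    !PySem.Str.startswith path "outputs/ci_outputs/"

-- the 'for path in paths' validation loop of A
def pvValidateLoop : List String → List String → List String
  | [], v => v
  | p :: ps, v =>
    let v1 := if pvForbidden.contains p then v ++ ["bundle_commands:forbidden_root_json:" ++ p] else v
    let v2 := if pvJsonCond p then v1 ++ ["bundle_commands:json_not_in_ci_outputs:" ++ p] else v1
    pvValidateLoop ps v2

def validate_bundle_commands (commands : List (List String)) : List String :=
  let paths := pvExtractAll commands []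
  if paths.isEmpty then ["bundle_commands:no_output_paths_found"]
  else pvValidateLoop paths []

-- ===== PORT B =====
-- inner loop of B: for token, nxt in zip(command, command[1:]), fused checks, found flag
def pvScanCmd : List (String × String) → List String × Bool → List String × Bool
  | [], st => st
  | (token, nxt) :: rest, (v, f) =>
    if pvOutputFlags.contains token then
      let path := pvNorm nxt
      let v1 := if pvForbidden.contains path then v ++ ["bundle_commands:forbidden_root_json:" ++ path] else v
      let v2 := if pvJsonCond path then v1 ++ ["bundle_commands:json_not_in_ci_outputs:" ++ path] else v1
      pvScanCmd rest (v2, true)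
    else pvScanCmd rest (v, f)

def validate_bundle_commands_alt (commands : List (List String)) : List String :=
  let st := commands.foldl (fun st c => pvScanCmd (c.zip c.tail) st) ([], false)
  if st.2 then st.1 else st.1 ++ ["bundle_commands:no_output_paths_found"]

-- ===== PRECONDITION & SPEC =====
def Spec_validate_bundle_commands (commands : List (List String)) (out : List String) : Prop := out = validate_bundle_commands_alt commands
instance (commands : List (List String)) (out : List String) : Decidable (Spec_validate_bundle_commands commands out) := by unfold Spec_validate_bundle_commands; infer_instance

-- ===== CLAIM (what is proved, stated in full; the proofs are below) =====
def Claim_equal_validate_bundle_commands : Prop := ∀ (commands : List (List String)), Dom_validate_bundle_commands commands → Spec_validate_bundle_commands commands (validate_bundle_commands commands)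

-- ===== LEMMAS AND PROOFS =====

-- the per-pair path contributed by A's extraction
def pvPairPath (pr : String × String) : List String :=
  if pvOutputFlags.contains pr.1 then [pvNorm pr.2] else []

-- the two inline checks as a list, in A's order
def pvChecks (path : String) : List String :=
  (if pvForbidden.contains path then ["bundle_commands:forbidden_root_json:" ++ path] else []) ++
  (if pvJsonCond path then ["bundle_commands:json_not_in_ci_outputs:" ++ path] else [])

def pvPairChecks (pr : String × String) : List String :=
  if pvOutputFlags.contains pr.1 then pvChecks (pvNorm pr.2) else []

theorem pvExtractLoop_eq (suf : List String) : ∀ (c : List String) (i : Int),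
    0 ≤ i → c.drop i.toNat = suf → ∀ found,
    pvExtractLoop c (PySem.List.enumerate suf i) found
      = found ++ (suf.zip suf.tail).flatMap pvPairPath := by
  induction suf with
  | nil => intro c i _ _ found; simp [PySem.List.enumerate_nil, pvExtractLoop]
  | cons t rest ih =>
    intro c i hi hdrop found
    have hlt : i.toNat < c.length := by
      by_contra h
      rw [List.drop_eq_nil_of_le (by omega)] at hdrop
      exact List.cons_ne_nil t rest hdrop.symm
    have hlen : c.length = i.toNat + 1 + rest.length := by
      have := congrArg List.length hdrop
      simp only [List.length_drop, List.length_cons] at this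
      omega
    have hdrop' : c.drop (i + 1).toNat = rest := by
      have ht : c.drop (i.toNat + 1) = (c.drop i.toNat).tail := by
        rw [← List.tail_drop]
      rw [show (i + 1).toNat = i.toNat + 1 by omega, ht, hdrop, List.tail_cons]
    rw [PySem.List.enumerate_cons]
    unfold pvExtractLoop
    by_cases hf : t ∈ pvOutputFlags
    · rw [if_pos (by simpa using hf)]
      cases rest with
      | nil =>
        have hge : i + 1 ≥ (c.length : Int) := by
          simp only [List.length_nil] at hlen; omega
        rw [if_pos hge, ih c (i + 1) (by omega) hdrop' found]
        simp
      | cons r rr =>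
        have hge : ¬ (i + 1 ≥ (c.length : Int)) := by
          simp only [List.length_cons] at hlen; omega
        rw [if_neg hge]
        have hget : PySem.List.pyGet? c (i + 1) = some r := by
          rw [PySem.List.pyGet?_of_nonneg c (by omega : (0:Int) ≤ i + 1)]
          have h0 : (c.drop (i+1).toNat)[0]? = some r := by rw [hdrop']; rfl
          rw [List.getElem?_drop] at h0
          simpa using h0
        rw [hget, ih c (i + 1) (by omega) hdrop']
        simp [List.zip_cons_cons, pvPairPath, hf]
    · rw [if_neg (by simpa using hf)]
      rw [ih c (i + 1) (by omega) hdrop' found]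
      cases rest with
      | nil => simp
      | cons r rr => simp [List.zip_cons_cons, pvPairPath, hf]

theorem pvExtractAll_eq : ∀ (cs : List (List String)) (found : List String),
    pvExtractAll cs found = found ++ cs.flatMap (fun c => (c.zip c.tail).flatMap pvPairPath) := by
  intro cs
  induction cs with
  | nil => intro found; simp [pvExtractAll]
  | cons c cs ih =>
    intro found
    unfold pvExtractAll
    rw [pvExtractLoop_eq c c 0 le_rfl (by simp), ih]
    simp

theorem pvValidateLoop_eq : ∀ (ps v : List String),
    pvValidateLoop ps v = v ++ ps.flatMap pvChecks := by
  intro ps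
  induction ps with
  | nil => intro v; simp [pvValidateLoop]
  | cons p ps ih =>
    intro v
    unfold pvValidateLoop
    rw [ih]
    by_cases h1 : p ∈ pvForbidden <;> by_cases h2 : pvJsonCond p <;>
      simp [pvChecks, h1, h2]

theorem pvScanCmd_eq : ∀ (prs : List (String × String)) (v : List String) (f : Bool),
    pvScanCmd prs (v, f)
      = (v ++ prs.flatMap pvPairChecks, f || prs.any (fun pr => pvOutputFlags.contains pr.1)) := by
  intro prs
  induction prs with
  | nil => intro v f; simp [pvScanCmd]
  | cons pr rest ih =>
    intro v f
    obtain ⟨token, nxt⟩ := pr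
    unfold pvScanCmd
    by_cases hf : token ∈ pvOutputFlags
    · rw [if_pos (by simpa using hf)]
      rw [ih]
      by_cases h1 : pvNorm nxt ∈ pvForbidden <;> by_cases h2 : pvJsonCond (pvNorm nxt) <;>
        simp [pvPairChecks, pvChecks, hf, h1, h2]
    · rw [if_neg (by simpa using hf)]
      rw [ih]
      simp [pvPairChecks, hf]

theorem pvFoldScan_eq : ∀ (cs : List (List String)) (v : List String) (f : Bool),
    cs.foldl (fun st c => pvScanCmd (c.zip c.tail) st) (v, f)
      = (v ++ cs.flatMap (fun c => (c.zip c.tail).flatMap pvPairChecks),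
         f || cs.any (fun c => (c.zip c.tail).any (fun pr => pvOutputFlags.contains pr.1))) := by
  intro cs
  induction cs with
  | nil => intro v f; simp
  | cons c cs ih =>
    intro v f
    simp only [List.foldl_cons]
    rw [pvScanCmd_eq, ih]
    simp [Bool.or_assoc]

-- validating the extracted paths of one pair = the fused per-pair checks
theorem pvPairPath_flatMap_checks (pr : String × String) :
    (pvPairPath pr).flatMap pvChecks = pvPairChecks pr := by
  unfold pvPairPath pvPairChecks
  by_cases h : pr.1 ∈ pvOutputFlags <;> simp [h]

-- A's validation of all extracted paths = B's fused violations
theorem pvFlat_eq (cs : List (List String)) :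
    (cs.flatMap (fun c => (c.zip c.tail).flatMap pvPairPath)).flatMap pvChecks
      = cs.flatMap (fun c => (c.zip c.tail).flatMap pvPairChecks) := by
  rw [List.flatMap_assoc]
  congr 1
  funext c
  rw [List.flatMap_assoc]
  congr 1
  funext pr
  exact pvPairPath_flatMap_checks pr

-- B's found_any flag is false exactly when A extracts no path
theorem pvAny_eq_false_iff (cs : List (List String)) :
    (cs.any fun c => (c.zip c.tail).any fun pr => pvOutputFlags.contains pr.1) = false
      ↔ cs.flatMap (fun c => (c.zip c.tail).flatMap pvPairPath) = [] := by
  simp [List.flatMap_eq_nil_iff, pvPairPath]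

-- ===== VERDICT (by name: the statement is the Claim_ definition above) =====
theorem validate_bundle_commands_spec : Claim_equal_validate_bundle_commands := by
  intro commands _
  unfold Spec_validate_bundle_commands validate_bundle_commands validate_bundle_commands_alt
  rw [pvExtractAll_eq, pvFoldScan_eq]
  simp only [List.nil_append, Bool.false_or]
  by_cases hP : commands.flatMap (fun c => (c.zip c.tail).flatMap pvPairPath) = []
  · have hany := (pvAny_eq_false_iff commands).mpr hP
    have hV : commands.flatMap (fun c => (c.zip c.tail).flatMap pvPairChecks) = [] := by
      rw [← pvFlat_eq, hP]; rfl
    rw [hP, hV]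
    rw [hany]
    simp
  · have hne : (commands.flatMap (fun c => (c.zip c.tail).flatMap pvPairPath)).isEmpty = false := by
      simp [hP]
    have hany : (commands.any fun c => (c.zip c.tail).any fun pr => pvOutputFlags.contains pr.1) = true := by
      by_contra h
      exact hP ((pvAny_eq_false_iff commands).mp (by simpa using h))
    rw [pvValidateLoop_eq, pvFlat_eq, hne, hany]
    simp
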